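-- pv_equiv track=rewrite | github.com/ilyaskalimullinn/alpha_representation | src/graph.py | build_faces_matrix
-- ===== SOURCE A (Python) =====
-- from typing import List, Tuple
--
-- def build_faces_matrix(faces: List[List[int]]) -> List[List[List[int]]]:
--     n_faces = len(faces)
--     matrix = [[None for _ in range(n_faces)] for _ in range(n_faces)]
--     for i, face in enumerate(faces):
--         matrix[i][i] = sorted(list(set(face)))
--     for i in range(n_faces):
--         for j in range(i + 1, n_faces):
--             v = set(faces[i]).intersection(faces[j])
--             v = sorted(list(v))
--             matrix[i][j] = v
--             matrix[j][i] = v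
--     return matrix
-- ===== SOURCE B (Python) =====
-- from typing import List
--
-- def build_faces_matrix(faces: List[List[int]]) -> List[List[List[int]]]:
--     # Precompute each face's sorted distinct vertices once and a membership set once;
--     # every cell is then a filter of an already-sorted list (no per-pair set build/sort).
--     uniq = [sorted(set(face)) for face in faces]
--     member = [set(face) for face in faces]
--     return [[[v for v in row if v in s] for s in member] for row in uniq]
-- ===== Notes on version B (the rewrite author's own statement) =====
-- stated objective: simpler
-- what changed: Instead of allocating a None matrix and filling diagonal and mirrored upper-triangle cells with per-pair set intersections plus a sort, B precomputes each face's sorted distinct vertex list and membership set once and builds every cell directly as a filter of the already-sorted list, so no per-pair set construction or sorting remains.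
import Mathlib
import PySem

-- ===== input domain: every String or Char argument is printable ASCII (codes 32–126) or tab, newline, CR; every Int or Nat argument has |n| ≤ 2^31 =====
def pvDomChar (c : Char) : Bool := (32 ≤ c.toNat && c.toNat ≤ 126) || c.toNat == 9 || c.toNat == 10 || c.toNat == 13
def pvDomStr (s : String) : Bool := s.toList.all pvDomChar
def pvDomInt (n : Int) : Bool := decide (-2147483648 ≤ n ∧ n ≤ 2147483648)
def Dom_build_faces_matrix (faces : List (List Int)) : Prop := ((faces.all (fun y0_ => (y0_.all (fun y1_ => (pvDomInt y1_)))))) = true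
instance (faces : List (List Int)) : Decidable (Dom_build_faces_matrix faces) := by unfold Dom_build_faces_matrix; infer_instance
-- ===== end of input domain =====

-- B replaces A's None-matrix + per-pair set-intersection-and-sort fill by precomputing each
-- face's sorted distinct vertex list and membership set once, building each cell as a filter
-- of the already-sorted list (objective: simpler; same asymptotic cost).

-- ===== PORT A =====
-- sorted(list(set(face)))
def pvDiag (face : List Int) : List Int :=
  PySem.List.sorted (PySem.Set.ofList face) (fun x => x)

-- sorted(list(set(a).intersection(b)))
def pvInter (a b : List Int) : List Int :=
  PySem.List.sorted (PySem.Set.inter (PySem.Set.ofList a) b) (fun x => x)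

def build_faces_matrix (faces : List (List Int)) : List (List (List Int)) :=
  let n := faces.length
  -- matrix = [[None]*n]*n : every cell is overwritten before return (diagonal by loop 1,
  -- off-diagonal by loop 2), so the None placeholder is represented by []
  let matrix0 : List (List (List Int)) :=
    (List.range n).map (fun _ => (List.range n).map (fun _ => ([] : List Int)))
  -- for i, face in enumerate(faces): matrix[i][i] = sorted(list(set(face)))
  -- (the enumerate index is a non-negative Int; .toNat is exact on it)
  let matrix1 :=
    (PySem.List.enumerate faces).foldl
      (fun m p => m.modify p.1.toNat (fun row => row.set p.1.toNat (pvDiag p.2))) matrix0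
  -- for i in range(n): for j in range(i+1, n): v = sorted(set(faces[i]) & faces[j]);
  --   matrix[i][j] = v; matrix[j][i] = v    (i < n and j < n, so faces.getD is exact)
  (List.range n).foldl
    (fun m i =>
      (List.range' (i+1) (n - (i+1))).foldl
        (fun m j =>
          let v := pvInter (faces.getD i []) (faces.getD j [])
          (m.modify i (fun row => row.set j v)).modify j (fun row => row.set i v)) m)
    matrix1

-- ===== PORT B =====
def build_faces_matrix_alt (faces : List (List Int)) : List (List (List Int)) :=
  let uniq := faces.map (fun face => PySem.List.sorted (PySem.Set.ofList face) (fun x => x))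
  let member := faces.map (fun face => PySem.Set.ofList face)
  uniq.map (fun row => member.map (fun s => row.filter (fun v => PySem.Set.contains s v)))

-- ===== PRECONDITION & SPEC =====
def Spec_build_faces_matrix (faces : List (List Int)) (out : List (List (List Int))) : Prop := out = build_faces_matrix_alt faces
instance (faces : List (List Int)) (out : List (List (List Int))) : Decidable (Spec_build_faces_matrix faces out) := by unfold Spec_build_faces_matrix; infer_instance

-- ===== CLAIM (what is proved, stated in full; the proofs are below) =====
def Claim_equal_build_faces_matrix : Prop := ∀ (faces : List (List Int)), Dom_build_faces_matrix faces → Spec_build_faces_matrix faces (build_faces_matrix faces)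

-- ===== LEMMAS AND PROOFS =====

-- the n×n table of a cell function
def tblF (n : Nat) (f : Nat → Nat → List Int) : List (List (List Int)) :=
  (List.range n).map (fun p => (List.range n).map (fun q => f p q))

theorem tbl_congr {n : Nat} {f g : Nat → Nat → List Int}
    (h : ∀ p, p < n → ∀ q, q < n → f p q = g p q) : tblF n f = tblF n g := by
  unfold tblF
  refine List.map_congr_left (fun p hp => ?_)
  refine List.map_congr_left (fun q hq => ?_)
  exact h p (List.mem_range.mp hp) q (List.mem_range.mp hq)

-- matrix[i][j] = v on a table
theorem upd_tbl {n : Nat} (f : Nat → Nat → List Int) (i j : Nat) (v : List Int) :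
    (tblF n f).modify i (fun row => row.set j v)
      = tblF n (fun p q => if p = i ∧ q = j then v else f p q) := by
  apply List.ext_getElem
  · simp [tblF]
  · intro p h1 h2
    simp only [tblF, List.getElem_modify, List.getElem_map, List.getElem_range] at *
    by_cases hpi : i = p
    · subst hpi
      simp only []
      apply List.ext_getElem
      · simp
      · intro q hq1 hq2
        simp only [List.getElem_map]
        by_cases hqj : j = q
        · subst hqj; simp
        · simp [hqj, Ne.symm hqj]
    · simp only [if_neg hpi]
      refine List.map_congr_left (fun q hq => ?_)
      have : ¬(p = i ∧ q = j) := fun h => hpi h.1.symm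
      simp [this]

-- any sorted() of a duplicate-free list equals the one strictly increasing list with the
-- same members
theorem sorted_char (xs ys : List Int) (hx : xs.Nodup)
    (hy : ys.Pairwise (· < ·)) (hm : ∀ v, v ∈ ys ↔ v ∈ xs) :
    PySem.List.sorted xs (fun x => x) = ys := by
  refine PySem.List.sorted_eq_of_perm_of_pairwise_lt xs ys _ ?_ hy
  exact (List.perm_ext_iff_of_nodup (hy.imp fun h => ne_of_lt h) hx).mpr
    (fun a => by rw [hm])

theorem pvInter_eq (a b : List Int) (ys : List Int)
    (hy : ys.Pairwise (· < ·)) (hm : ∀ v, v ∈ ys ↔ v ∈ a ∧ v ∈ b) :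
    pvInter a b = ys := by
  refine sorted_char _ _ ?_ hy ?_
  · exact PySem.Set.nodup_inter _ _ (PySem.Set.nodup_ofList a)
  · intro v
    rw [hm]
    rw [PySem.Set.mem_inter, PySem.Set.mem_ofList]

theorem pvInter_eq_filter (a b : List Int) :
    pvInter a b = (pvDiag a).filter (fun v => PySem.Set.contains (PySem.Set.ofList b) v) := by
  refine pvInter_eq a b _ ?_ ?_
  · exact List.Pairwise.sublist List.filter_sublist (PySem.List.sorted_ofList_pairwise_lt a)
  · intro v
    simp [pvDiag, List.mem_filter, PySem.List.mem_sorted, PySem.Set.mem_ofList]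

theorem pvInter_symm (a b : List Int) : pvInter a b = pvInter b a := by
  rw [pvInter_eq_filter b a]
  refine pvInter_eq a b _ ?_ ?_
  · exact List.Pairwise.sublist List.filter_sublist (PySem.List.sorted_ofList_pairwise_lt b)
  · intro v
    simp [pvDiag, List.mem_filter, PySem.List.mem_sorted, PySem.Set.mem_ofList,
      and_comm]

theorem pvInter_self (a : List Int) : pvInter a a = pvDiag a := by
  refine pvInter_eq a a _ (PySem.List.sorted_ofList_pairwise_lt a) ?_
  intro v
  simp [pvDiag, PySem.List.mem_sorted, PySem.Set.mem_ofList]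

-- loop 1: the diagonal fill over enumerate(faces)
theorem diag_loop (faces : List (List Int)) (l : List (Int × List Int))
    (f : Nat → Nat → List Int)
    (hl : ∀ p ∈ l, ∃ k : Nat, k < faces.length ∧ p = ((k : Int), faces.getD k [])) :
    l.foldl (fun m p => m.modify p.1.toNat (fun row => row.set p.1.toNat (pvDiag p.2)))
        (tblF faces.length f)
      = tblF faces.length
          (fun p q => if p = q ∧ (p : Int) ∈ l.map Prod.fst
            then pvDiag (faces.getD p []) else f p q) := by
  induction l generalizing f with
  | nil => exact (tbl_congr (by simp)).symm
  | cons hd tl ih =>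
    obtain ⟨k, hk, rfl⟩ := hl hd (List.mem_cons_self)
    simp only [List.foldl_cons]
    rw [show ((k : Int), faces.getD k []).1.toNat = k by simp]
    rw [upd_tbl f k k _]
    rw [ih _ (fun p hp => hl p (List.mem_cons_of_mem _ hp))]
    apply tbl_congr
    intro p hp q hq
    by_cases hpq : p = q
    · subst hpq
      by_cases ht : (p : Int) ∈ tl.map Prod.fst
      · simp [ht]
      · by_cases hpk : p = k
        · subst hpk
          simp [ht]
        · have : ¬ (p : Int) = (k : Int) := by exact_mod_cast hpk
          simp [ht, this, hpk]
    · have h1 : ¬ (p = k ∧ q = k) := fun h => hpq (h.1.trans h.2.symm)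
      simp [hpq, h1]

-- loop 2, inner: for j in js, matrix[i][j] = matrix[j][i] = v(i,j)
theorem inner_loop (faces : List (List Int)) (i : Nat) (js : List Nat)
    (hjs : ∀ j ∈ js, i < j ∧ j < faces.length) (g : Nat → Nat → List Int) :
    js.foldl (fun m j =>
        (m.modify i (fun row => row.set j (pvInter (faces.getD i []) (faces.getD j [])))).modify
          j (fun row => row.set i (pvInter (faces.getD i []) (faces.getD j []))))
        (tblF faces.length g)
      = tblF faces.length (fun p q =>
          if p = i ∧ q ∈ js then pvInter (faces.getD i []) (faces.getD q [])
          else if q = i ∧ p ∈ js then pvInter (faces.getD i []) (faces.getD p [])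
          else g p q) := by
  induction js generalizing g with
  | nil => exact (tbl_congr (by simp)).symm
  | cons j tl ih =>
    obtain ⟨hij, hjn⟩ := hjs j List.mem_cons_self
    have hit : ∀ x ∈ tl, i < x := fun x hx => (hjs x (List.mem_cons_of_mem _ hx)).1
    have hji : j ≠ i := Nat.ne_of_gt hij
    have hinotl : i ∉ tl := fun h => absurd (hit i h) (lt_irrefl i)
    simp only [List.foldl_cons]
    rw [upd_tbl, upd_tbl, ih (fun x hx => hjs x (List.mem_cons_of_mem _ hx))]
    apply tbl_congr
    clear ih hjs
    intro p hp q hq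
    simp only [List.mem_cons]
    by_cases hqt : q ∈ tl <;> by_cases hpt : p ∈ tl <;>
      by_cases hpi : p = i <;> by_cases hqi : q = i <;>
      by_cases hpj : p = j <;> by_cases hqj : q = j <;>
      simp_all
-- the full off-diagonal state after the first k outer iterations
def Ffun (faces : List (List Int)) (k : Nat) (p q : Nat) : List Int :=
  if p = q then pvDiag (faces.getD p [])
  else if min p q < k then pvInter (faces.getD p []) (faces.getD q [])
  else []

-- loop 2, outer
theorem outer_loop (faces : List (List Int)) :
    ∀ k, k ≤ faces.length →
    (List.range k).foldl (fun m i =>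
        (List.range' (i+1) (faces.length - (i+1))).foldl
          (fun m j =>
            (m.modify i (fun row => row.set j (pvInter (faces.getD i []) (faces.getD j [])))).modify
              j (fun row => row.set i (pvInter (faces.getD i []) (faces.getD j [])))) m)
        (tblF faces.length (Ffun faces 0))
      = tblF faces.length (Ffun faces k) := by
  intro k hk
  induction k with
  | zero => simp
  | succ k ih =>
    rw [List.range_succ, List.foldl_append, ih (Nat.le_of_succ_le hk)]
    simp only [List.foldl_cons, List.foldl_nil]
    rw [inner_loop faces k _ (fun j hj => by
      rw [List.mem_range'_1] at hj; omega) (Ffun faces k)]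
    apply tbl_congr
    clear ih
    intro p hp q hq
    by_cases hpq : p = q
    · simp [Ffun, hpq, show ¬(q = k ∧ k < q ∧ q < k + 1 + (faces.length - (k + 1))) by omega]
    · by_cases hlt : min p q < k
      · simp [Ffun, hpq, hlt, show min p q < k + 1 by omega,
          show ¬(p = k ∧ k < q ∧ q < k + 1 + (faces.length - (k + 1))) by omega,
          show ¬(q = k ∧ k < p ∧ p < k + 1 + (faces.length - (k + 1))) by omega]
      · by_cases hpk : p = k
        · simp [Ffun, hpk, show k < q ∧ q < k + 1 + (faces.length - (k + 1)) by omega,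
            show ¬ k = q by omega, show min k q < k + 1 by omega]
        · by_cases hqk : q = k
          · simp [Ffun, hqk, hpk, show k < p ∧ p < k + 1 + (faces.length - (k + 1)) by omega,
              show min p k < k + 1 by omega]
            exact pvInter_symm _ _
          · simp [Ffun, hpq, hlt,
              show ¬(p = k ∧ k < q ∧ q < k + 1 + (faces.length - (k + 1))) by omega,
              show ¬(q = k ∧ k < p ∧ p < k + 1 + (faces.length - (k + 1))) by omega,
              show ¬ min p q < k + 1 by omega]

theorem a_eq_tbl (faces : List (List Int)) :
    build_faces_matrix faces
      = tblF faces.length (fun p q => pvInter (faces.getD p []) (faces.getD q [])) := by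
  rw [show build_faces_matrix faces
      = (List.range faces.length).foldl (fun m i =>
          (List.range' (i+1) (faces.length - (i+1))).foldl
            (fun m j =>
              (m.modify i (fun row => row.set j (pvInter (faces.getD i []) (faces.getD j [])))).modify
                j (fun row => row.set i (pvInter (faces.getD i []) (faces.getD j [])))) m)
          ((PySem.List.enumerate faces).foldl
            (fun m p => m.modify p.1.toNat (fun row => row.set p.1.toNat (pvDiag p.2)))
            (tblF faces.length (fun _ _ => []))) from rfl]
  rw [diag_loop faces _ _ (fun p hp => by
    rw [PySem.List.mem_enumerate_iff] at hp
    obtain ⟨k, hk, rfl⟩ := hp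
    exact ⟨k, hk, by rw [List.getD_eq_getElem _ _ hk]; norm_num⟩)]
  have h1 : tblF faces.length
      (fun p q => if p = q ∧ (p : Int) ∈ (PySem.List.enumerate faces).map Prod.fst
        then pvDiag (faces.getD p []) else (fun _ _ => ([] : List Int)) p q)
      = tblF faces.length (Ffun faces 0) := by
    apply tbl_congr
    intro p hp q hq
    have hmem : (p : Int) ∈ (PySem.List.enumerate faces).map Prod.fst := by
      simp only [List.mem_map]
      refine ⟨((p : Int), faces[p]'hp), ?_, rfl⟩
      rw [PySem.List.mem_enumerate_iff]
      exact ⟨p, hp, by simp⟩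
    by_cases hpq : p = q
    · subst hpq
      rw [if_pos ⟨rfl, hmem⟩]
      simp [Ffun]
    · rw [if_neg (fun h => hpq h.1)]
      simp [Ffun, hpq]
  rw [h1, outer_loop faces faces.length le_rfl]
  apply tbl_congr
  intro p hp q hq
  by_cases hpq : p = q
  · subst hpq
    have hd : Ffun faces faces.length p p = pvDiag (faces.getD p []) := by
      simp [Ffun]
    rw [hd]
    exact (pvInter_self _).symm
  · simp only [Ffun]
    rw [if_neg hpq, if_pos (show min p q < faces.length by omega)]

theorem b_eq_tbl (faces : List (List Int)) :
    build_faces_matrix_alt faces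
      = tblF faces.length (fun p q => pvInter (faces.getD p []) (faces.getD q [])) := by
  apply List.ext_getElem
  · simp [build_faces_matrix_alt, tblF]
  · intro p h1 h2
    have hp : p < faces.length := by simpa [build_faces_matrix_alt] using h1
    apply List.ext_getElem
    · simp [build_faces_matrix_alt, tblF]
    · intro q hq1 hq2
      have hq : q < faces.length := by
        simpa [build_faces_matrix_alt] using hq1
      simp only [build_faces_matrix_alt, tblF, List.getElem_map, List.getElem_range]
      rw [pvInter_eq_filter]
      simp only [pvDiag]
      rw [List.getD_eq_getElem _ _ hp, List.getD_eq_getElem _ _ hq]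

-- ===== VERDICT (by name: the statement is the Claim_ definition above) =====
theorem build_faces_matrix_spec : Claim_equal_build_faces_matrix := by
  intro faces _
  show build_faces_matrix faces = build_faces_matrix_alt faces
  rw [a_eq_tbl, b_eq_tbl]
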